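-- pv_equiv track=rewrite | github.com/Tuseeq1/CodingProblems | Even_Tree.py | evenForest
-- ===== SOURCE A (Python) =====
-- def make_tree(t_from, t_to):
--     tree = {}
--     for node1, node2 in zip(t_from, t_to):
--         tree.setdefault(node1, []).append(node2)
--         tree.setdefault(node2, []).append(node1)
--
--     return tree
--
-- def is_even_nodes(tree, node, except_for):
--     count = 1
--     nodes = [node]
--     nodes_visited = set([node])
--     while nodes:
--         cur_node = nodes.pop()
--         for n in tree[cur_node]:
--             if n != except_for and n not in nodes_visited:
--                 nodes_visited.add(n)
--                 count += 1
--                 nodes.append(n)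
--
--     return count % 2 == 0
--
-- def remove_edge(tree, node1, node2):
--     tree[node1].remove(node2)
--     tree[node2].remove(node1)
--
-- def evenForest(t_nodes, t_edges, t_from, t_to):
--     tree = make_tree(t_from, t_to)
--     removed_edge_count = 0
--     i = 0
--     while i != len(t_from):
--         dist1 = is_even_nodes(tree, t_from[i], t_to[i])
--         dist2 = is_even_nodes(tree, t_to[i], t_from[i])
--
--         if dist1 and dist2:
--             node1 = t_from.pop(i)
--             node2 = t_to.pop(i)
--             remove_edge(tree, node1, node2)
--             i = 0
--             removed_edge_count += 1
--
--         else: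
--             i += 1
--
--     return removed_edge_count
-- ===== SOURCE B (Python) =====
-- def _reach_even(edges, start, block):
--     # parity of the number of vertices reachable from start without ever
--     # entering block, by repeated set saturation over the immutable edge list
--     seen = {start}
--     while True:
--         new = {q for (a, b) in edges
--                  for (p, q) in ((a, b), (b, a))
--                  if p in seen and q != block and q not in seen}
--         if not new:
--             return len(seen) % 2 == 0
--         seen |= new
--
-- def _remove_first(edges):
--     # the first edge whose two sides are both even, removed; None if there is none
--     for i, (u, v) in enumerate(edges):
--         if _reach_even(edges, u, v) and _reach_even(edges, v, u):
--             return edges[:i] + edges[i + 1:]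
--     return None
--
-- def evenForest(t_nodes, t_edges, t_from, t_to):
--     edges = list(zip(t_from, t_to))
--     removed = 0
--     while True:
--         nxt = _remove_first(edges)
--         if nxt is None:
--             return removed
--         edges = nxt
--         removed += 1
-- ===== Notes on version B (the rewrite author's own statement) =====
-- stated objective: alternative
-- what changed: B replaces A's mutable adjacency dict, hand-run stack DFS and index-reset while-loop with in-place pops by a pure greedy loop over immutable zipped edge lists whose side-parity is computed by fixed-point set saturation; B leaves the caller's t_from/t_to lists unmutated.
import Mathlib
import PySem

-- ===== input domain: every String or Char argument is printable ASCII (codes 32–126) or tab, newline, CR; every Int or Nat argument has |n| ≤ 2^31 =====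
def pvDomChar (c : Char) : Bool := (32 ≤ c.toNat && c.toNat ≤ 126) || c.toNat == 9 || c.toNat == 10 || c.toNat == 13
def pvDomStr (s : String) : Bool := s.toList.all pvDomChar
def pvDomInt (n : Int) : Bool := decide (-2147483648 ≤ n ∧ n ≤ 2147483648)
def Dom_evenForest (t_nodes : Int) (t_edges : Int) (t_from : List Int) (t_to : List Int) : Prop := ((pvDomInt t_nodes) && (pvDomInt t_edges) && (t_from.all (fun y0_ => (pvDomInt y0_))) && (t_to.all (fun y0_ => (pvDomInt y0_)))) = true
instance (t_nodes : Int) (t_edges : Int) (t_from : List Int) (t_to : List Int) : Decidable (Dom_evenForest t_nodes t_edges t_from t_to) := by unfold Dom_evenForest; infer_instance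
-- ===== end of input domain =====

-- B replaces A's mutable adjacency dict + stack DFS + index-reset scan (with in-place pops
-- from t_from/t_to) by a pure greedy recursion over the immutable zipped edge list whose
-- reachability parity is computed by fixed-point set saturation; A mutates t_from/t_to in
-- place (pops), B does not — the equivalence proved here is about the RETURN value only.

-- ===== PORT A =====
-- make_tree: tree.setdefault(n1, []).append(n2) twice = Dict.modify with default []
def makeTree (t_from t_to : List Int) : PySem.Dict Int (List Int) :=
  (t_from.zip t_to).foldl
    (fun d p =>
      (d.modify p.1 [] (fun l => l ++ [p.2])).modify p.2 [] (fun l => l ++ [p.1]))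
    PySem.Dict.empty

-- the while-loop of is_even_nodes; the stack keeps its TOP at the head (python appends to /
-- pops from the end of `nodes`); fuel is a totality guard only, never exhausted by the caller
def ienLoop (tree : PySem.Dict Int (List Int)) (exceptFor : Int) :
    Nat → List Int → PySem.Set Int → Int → (PySem.Set Int × Int)
  | 0, _, visited, count => (visited, count)
  | fuel + 1, nodes, visited, count =>
    match nodes with
    | [] => (visited, count)
    | cur :: rest =>
      let s := (tree.getD cur []).foldl
        (fun st n =>
          if n != exceptFor && !(PySem.Set.contains st.2.1 n) then
            (n :: st.1, (PySem.Set.add st.2.1 n, st.2.2 + 1))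
          else st)
        (rest, (visited, count))
      ienLoop tree exceptFor fuel s.1 s.2.1 s.2.2

def isEvenNodes (tree : PySem.Dict Int (List Int)) (fuel : Nat) (node exceptFor : Int) : Bool :=
  let r := ienLoop tree exceptFor fuel [node] (PySem.Set.ofList [node]) 1
  PySem.Int.mod r.2 2 == 0

-- remove_edge: tree[u].remove(v); tree[v].remove(u).  The ValueError branch of list.remove
-- is unreachable on the states A builds; `.getD l` is a totality guard only.
def removeEdge (tree : PySem.Dict Int (List Int)) (u v : Int) : PySem.Dict Int (List Int) :=
  (tree.modify u [] (fun l => (PySem.List.remove? l v).getD l)).modify v []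
    (fun l => (PySem.List.remove? l u).getD l)

-- the outer while-loop; t_from.pop(i)/t_to.pop(i) drop index i (List.eraseIdx);
-- t_to[i] raises IndexError when len(t_to) < len(t_from) — outside Pre_, `pyGetD … 0` is a
-- totality guard there; the outer fuel is a totality guard, never exhausted by the caller
def loopA (ienFuel : Nat) :
    Nat → PySem.Dict Int (List Int) → List Int → List Int → Nat → Int → Int
  | 0, _, _, _, _, cnt => cnt
  | fuel + 1, tree, f, t, i, cnt =>
    if i = f.length then cnt
    else
      let u := PySem.List.pyGetD f (i : Int) 0
      let v := PySem.List.pyGetD t (i : Int) 0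
      let dist1 := isEvenNodes tree ienFuel u v
      let dist2 := isEvenNodes tree ienFuel v u
      if dist1 && dist2 then
        loopA ienFuel fuel (removeEdge tree u v) (f.eraseIdx i) (t.eraseIdx i) 0 (cnt + 1)
      else
        loopA ienFuel fuel tree f t (i + 1) cnt

def evenForest (t_nodes : Int) (t_edges : Int) (t_from : List Int) (t_to : List Int) : Int :=
  loopA (4 * t_from.length + 4) ((t_from.length + 1) * (t_from.length + 1) + 1)
    (makeTree t_from t_to) t_from t_to 0 0

-- ===== PORT B =====
-- the set comprehension building `new`: both orientations of each edge, in list order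
def satStep (edges : List (Int × Int)) (block : Int) (seen : PySem.Set Int) : PySem.Set Int :=
  edges.foldl
    (fun acc p =>
      let acc1 :=
        if PySem.Set.contains seen p.1 && p.2 != block && !(PySem.Set.contains seen p.2) then
          PySem.Set.add acc p.2
        else acc
      if PySem.Set.contains seen p.2 && p.1 != block && !(PySem.Set.contains seen p.1) then
        PySem.Set.add acc1 p.1
      else acc1)
    PySem.Set.empty

-- the `while True` of _reach_even; fuel is a totality guard (seen grows strictly until stable)
def satLoop (edges : List (Int × Int)) (block : Int) :
    Nat → PySem.Set Int → PySem.Set Int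
  | 0, seen => seen
  | fuel + 1, seen =>
    let new := satStep edges block seen
    if new.isEmpty then seen else satLoop edges block fuel (PySem.Set.union seen new)

def reachEven (edges : List (Int × Int)) (start block : Int) : Bool :=
  let seen := satLoop edges block (2 * edges.length + 2) (PySem.Set.ofList [start])
  PySem.Int.mod (PySem.Set.len seen) 2 == 0

-- the for/enumerate scan of _remove_first: first removable edge, the list with it dropped
def removeFirst (full : List (Int × Int)) : List (Int × Int) → Option (List (Int × Int))
  | [] => none
  | p :: rest =>
    if reachEven full p.1 p.2 && reachEven full p.2 p.1 then some rest
    else (removeFirst full rest).map (fun r => p :: r)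

-- the while-loop of evenForest, with its `removed` accumulator; fuel is a totality guard
-- (each step removes one edge), never exhausted by the caller
def greedyB : Nat → List (Int × Int) → Int → Int
  | 0, _, removed => removed
  | fuel + 1, edges, removed =>
    match removeFirst edges edges with
    | some rest => greedyB fuel rest (removed + 1)
    | none => removed

def evenForest_alt (t_nodes : Int) (t_edges : Int) (t_from : List Int) (t_to : List Int) : Int :=
  greedyB (t_from.length + 1) (t_from.zip t_to) 0

-- ===== PRECONDITION & SPEC =====
-- A raises IndexError (t_to[i]) exactly when t_from is longer than t_to; nothing else raises.
def Pre_evenForest (t_nodes : Int) (t_edges : Int) (t_from : List Int) (t_to : List Int) : Prop :=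
  t_from.length ≤ t_to.length
instance (t_nodes : Int) (t_edges : Int) (t_from : List Int) (t_to : List Int) : Decidable (Pre_evenForest t_nodes t_edges t_from t_to) := by unfold Pre_evenForest; infer_instance

def pvWitness_evenForest : Int × Int × List Int × List Int :=
  (10, 9, [2, 3, 4, 5, 6, 7, 8, 9, 10], [1, 1, 3, 2, 1, 2, 6, 8, 8])

def Spec_evenForest (t_nodes : Int) (t_edges : Int) (t_from : List Int) (t_to : List Int) (out : Int) : Prop := out = evenForest_alt t_nodes t_edges t_from t_to
instance (t_nodes : Int) (t_edges : Int) (t_from : List Int) (t_to : List Int) (out : Int) : Decidable (Spec_evenForest t_nodes t_edges t_from t_to out) := by unfold Spec_evenForest; infer_instance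

-- ===== CLAIM (what is proved, stated in full; the proofs are below) =====
def Claim_equal_evenForest : Prop := ∀ (t_nodes : Int) (t_edges : Int) (t_from : List Int) (t_to : List Int), Dom_evenForest t_nodes t_edges t_from t_to → Pre_evenForest t_nodes t_edges t_from t_to → Spec_evenForest t_nodes t_edges t_from t_to (evenForest t_nodes t_edges t_from t_to)

-- ===== LEMMAS AND PROOFS =====

-- x–y are neighbours in the edge list L (either orientation)
def adjL (L : List (Int × Int)) (x y : Int) : Prop := (x, y) ∈ L ∨ (y, x) ∈ L

-- x–y are neighbours in the adjacency dict
def adjT (tree : PySem.Dict Int (List Int)) (x y : Int) : Prop := y ∈ tree.getD x []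

-- S is closed under following edges, except into `block`
def ClosedS (adj : Int → Int → Prop) (block : Int) (S : List Int) : Prop :=
  ∀ x ∈ S, ∀ y, adj x y → y ≠ block → y ∈ S

-- the adjacency dict carries exactly the edge multiset of L
def Hcnt (tree : PySem.Dict Int (List Int)) (L : List (Int × Int)) : Prop :=
  ∀ x y : Int, (tree.getD x []).count y = L.count (x, y) + L.count (y, x)


-- ---- generic facts about PySem primitives and List counting ----

lemma pv_remove_eq {l : List Int} {v : Int} (h : v ∈ l) :
    PySem.List.remove? l v = some (l.erase v) := by
  induction l with
  | nil => simp at h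
  | cons a t ih =>
    by_cases hav : a = v
    · subst hav
      simp [PySem.List.remove?, List.idxOf?, List.findIdx?_cons]
    · have hbe : (a == v) = false := by simpa using hav
      rcases List.mem_cons.mp h with h1 | h1
      · exact absurd h1.symm hav
      · have ht := ih h1
        simp only [PySem.List.remove?, List.idxOf?, List.findIdx?_cons, hbe] at ht ⊢
        rw [List.erase_cons_tail (by simpa using hav)]
        cases hfi : List.findIdx? (fun x => x == v) t with
        | none => simp [hfi] at ht
        | some j =>
          simp [hfi] at ht ⊢
          simpa using ht

lemma pv_remove_getD {l : List Int} {v : Int} (h : v ∈ l) :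
    (PySem.List.remove? l v).getD l = l.erase v := by
  simp [pv_remove_eq h]

lemma pv_count_eraseIdx :
    ∀ (L : List (Int × Int)) (i : Nat) (h : i < L.length) (p : Int × Int),
      (L.eraseIdx i).count p = L.count p - (if L[i] = p then 1 else 0) := by
  intro L
  induction L with
  | nil => intro i h; simp at h
  | cons a t ih =>
    intro i h p
    cases i with
    | zero =>
      simp only [List.eraseIdx_zero, List.tail_cons, List.getElem_cons_zero, List.count_cons]
      by_cases hap : a = p <;> simp [hap]
    | succ j =>
      have hj : j < t.length := by simpa using h
      simp only [List.eraseIdx_cons_succ, List.count_cons, List.getElem_cons_succ]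
      rw [ih j hj p]
      by_cases hjp : t[j] = p
      · have hpos : 0 < t.count p :=
          List.count_pos_iff.mpr (by rw [← hjp]; exact t.getElem_mem hj)
        rw [if_pos hjp, if_pos hjp]
        by_cases hap : (a == p) = true <;> omega
      · rw [if_neg hjp, if_neg hjp]
        by_cases hap : (a == p) = true <;> omega

lemma cond_dfs_iff (s : PySem.Set Int) (n ef : Int) :
    (n != ef && !(PySem.Set.contains s n)) = true ↔ n ≠ ef ∧ n ∉ s := by
  simp

lemma cond_sat_iff (seen : PySem.Set Int) (a c b : Int) :
    (PySem.Set.contains seen a && c != b && !(PySem.Set.contains seen c)) = true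
      ↔ a ∈ seen ∧ c ≠ b ∧ c ∉ seen := by
  simp [and_assoc]

-- ---- closed sets: the common reachability notion ----

-- rmB L p: the agreed removability test for the pair p on edge list L (B's formulation)
def rmB (L : List (Int × Int)) (p : Int × Int) : Bool :=
  reachEven L p.1 p.2 && reachEven L p.2 p.1

lemma hcnt_adj_iff {tree : PySem.Dict Int (List Int)} {L : List (Int × Int)}
    (h : Hcnt tree L) (x y : Int) : adjT tree x y ↔ adjL L x y := by
  unfold adjT adjL
  constructor
  · intro hm
    have := List.count_pos_iff.mpr hm
    rw [h x y] at this
    rcases Nat.lt_or_ge 0 (L.count (x, y)) with hc | hc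
    · exact Or.inl (List.count_pos_iff.mp hc)
    · exact Or.inr (List.count_pos_iff.mp (by omega))
  · intro hm
    apply List.count_pos_iff.mp
    rw [h x y]
    rcases hm with hm | hm
    · have := List.count_pos_iff.mpr hm; omega
    · have := List.count_pos_iff.mpr hm; omega

lemma closed_transfer {tree : PySem.Dict Int (List Int)} {L : List (Int × Int)}
    (h : Hcnt tree L) (b : Int) (S : List Int) :
    ClosedS (adjT tree) b S ↔ ClosedS (adjL L) b S := by
  unfold ClosedS
  constructor
  · intro hc x hx y hadj hyb; exact hc x hx y ((hcnt_adj_iff h x y).mpr hadj) hyb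
  · intro hc x hx y hadj hyb; exact hc x hx y ((hcnt_adj_iff h x y).mp hadj) hyb

lemma flatMap_pair_len :
    ∀ (L : List (Int × Int)), (L.flatMap (fun p => [p.1, p.2])).length = 2 * L.length := by
  intro L
  induction L with
  | nil => simp
  | cons p t ih =>
    simp only [List.flatMap_cons, List.length_append, List.length_cons, ih, List.length_nil]
    omega

-- the bounding vertex set: start plus every endpoint of L
def nodesOf (start : Int) (L : List (Int × Int)) : List Int :=
  PySem.Set.ofList (start :: L.flatMap (fun p => [p.1, p.2]))

lemma nodesOf_start (start : Int) (L : List (Int × Int)) : start ∈ nodesOf start L := by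
  unfold nodesOf; rw [PySem.Set.mem_ofList]; simp

lemma nodesOf_nodup (start : Int) (L : List (Int × Int)) : (nodesOf start L).Nodup :=
  PySem.Set.nodup_ofList _

lemma nodesOf_len (start : Int) (L : List (Int × Int)) :
    (nodesOf start L).length ≤ 2 * L.length + 1 := by
  unfold nodesOf
  have h1 := PySem.Set.length_ofList_le (start :: L.flatMap (fun p => [p.1, p.2]))
  have h2 := flatMap_pair_len L
  simp only [List.length_cons, h2] at h1
  omega

lemma nodesOf_closed (start b : Int) (L : List (Int × Int)) :
    ClosedS (adjL L) b (nodesOf start L) := by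
  intro x _ y hadj _
  unfold nodesOf
  rw [PySem.Set.mem_ofList]
  rcases hadj with hm | hm
  · exact List.mem_cons_of_mem _ (List.mem_flatMap.mpr ⟨(x, y), hm, by simp⟩)
  · exact List.mem_cons_of_mem _ (List.mem_flatMap.mpr ⟨(y, x), hm, by simp⟩)

-- ---- A's DFS loop ----

-- the inner for-loop of is_even_nodes, as a function of its fold state
lemma ienFold_spec (ef : Int) (neigh : List Int) :
    ∀ (st0 : List Int × PySem.Set Int × Int),
      (∀ y, y ∈ (neigh.foldl
          (fun st n =>
            if n != ef && !(PySem.Set.contains st.2.1 n) then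
              (n :: st.1, (PySem.Set.add st.2.1 n, st.2.2 + 1))
            else st) st0).2.1 ↔ y ∈ st0.2.1 ∨ (y ∈ neigh ∧ y ≠ ef))
      ∧ (∀ s, s ∈ (neigh.foldl
          (fun st n =>
            if n != ef && !(PySem.Set.contains st.2.1 n) then
              (n :: st.1, (PySem.Set.add st.2.1 n, st.2.2 + 1))
            else st) st0).1 ↔ s ∈ st0.1 ∨ (s ∈ (neigh.foldl
          (fun st n =>
            if n != ef && !(PySem.Set.contains st.2.1 n) then
              (n :: st.1, (PySem.Set.add st.2.1 n, st.2.2 + 1))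
            else st) st0).2.1 ∧ s ∉ st0.2.1))
      ∧ (st0.2.1.Nodup → (neigh.foldl
          (fun st n =>
            if n != ef && !(PySem.Set.contains st.2.1 n) then
              (n :: st.1, (PySem.Set.add st.2.1 n, st.2.2 + 1))
            else st) st0).2.1.Nodup)
      ∧ (st0.2.1.Nodup → st0.2.2 = (st0.2.1.length : Int) → (neigh.foldl
          (fun st n =>
            if n != ef && !(PySem.Set.contains st.2.1 n) then
              (n :: st.1, (PySem.Set.add st.2.1 n, st.2.2 + 1))
            else st) st0).2.2 = ((neigh.foldl
          (fun st n =>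
            if n != ef && !(PySem.Set.contains st.2.1 n) then
              (n :: st.1, (PySem.Set.add st.2.1 n, st.2.2 + 1))
            else st) st0).2.1.length : Int))
      ∧ (neigh.foldl
          (fun st n =>
            if n != ef && !(PySem.Set.contains st.2.1 n) then
              (n :: st.1, (PySem.Set.add st.2.1 n, st.2.2 + 1))
            else st) st0).1.length + st0.2.1.length = st0.1.length + (neigh.foldl
          (fun st n =>
            if n != ef && !(PySem.Set.contains st.2.1 n) then
              (n :: st.1, (PySem.Set.add st.2.1 n, st.2.2 + 1))
            else st) st0).2.1.length := by
  induction neigh with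
  | nil =>
    intro st0
    refine ⟨by simp, by simp, fun h => h, fun _ h => h, rfl⟩
  | cons n ns ih =>
    intro st0
    simp only [List.foldl_cons]
    by_cases hc : (n != ef && !(PySem.Set.contains st0.2.1 n)) = true
    · obtain ⟨hne, hnm⟩ := (cond_dfs_iff st0.2.1 n ef).mp hc
      rw [if_pos hc]
      obtain ⟨ih1, ih2, ih3, ih4, ih5⟩ := ih (n :: st0.1, (PySem.Set.add st0.2.1 n, st0.2.2 + 1))
      refine ⟨?_, ?_, ?_, ?_, ?_⟩
      · intro y
        rw [ih1 y]
        simp only [PySem.Set.mem_add, List.mem_cons]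
        constructor
        · rintro (⟨hy | hy⟩ | ⟨hy, hyef⟩)
          · exact Or.inl hy
          · exact Or.inr ⟨Or.inl hy, hy ▸ hne⟩
          · exact Or.inr ⟨Or.inr hy, hyef⟩
        · rintro (hy | ⟨hy | hy, hyef⟩)
          · exact Or.inl (Or.inl hy)
          · exact Or.inl (Or.inr hy)
          · exact Or.inr ⟨hy, hyef⟩
      · intro s
        have hnr : n ∈ (ns.foldl _ (n :: st0.1, (PySem.Set.add st0.2.1 n, st0.2.2 + 1))).2.1 :=
          (ih1 n).mpr (Or.inl ((PySem.Set.mem_add _ _ _).mpr (Or.inr rfl)))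
        rw [ih2 s]
        simp only [List.mem_cons, PySem.Set.mem_add]
        constructor
        · rintro (⟨hs | hs⟩ | ⟨hs, hs2⟩)
          · exact Or.inr ⟨hs ▸ hnr, hs ▸ hnm⟩
          · exact Or.inl hs
          · exact Or.inr ⟨hs, fun hmem => hs2 (Or.inl hmem)⟩
        · rintro (hs | ⟨hs, hs2⟩)
          · exact Or.inl (Or.inr hs)
          · by_cases hsn : s = n
            · exact Or.inl (Or.inl hsn)
            · exact Or.inr ⟨hs, fun hmem => by
                rcases hmem with hmem | hmem
                · exact hs2 hmem
                · exact hsn hmem⟩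
      · intro hnd; exact ih3 (PySem.Set.nodup_add _ _ hnd)
      · intro hnd hcnt
        refine ih4 (PySem.Set.nodup_add _ _ hnd) ?_
        rw [PySem.Set.add_of_not_mem hnm]
        simp [hcnt]
      · have : (PySem.Set.add st0.2.1 n).length = st0.2.1.length + 1 := by
          rw [PySem.Set.add_of_not_mem hnm]; simp
        simp only [List.length_cons] at ih5 ⊢
        omega
    · rw [if_neg hc]
      have hor : n = ef ∨ n ∈ st0.2.1 := by
        by_cases h1 : n = ef
        · exact Or.inl h1
        · right
          by_contra hmem
          exact hc ((cond_dfs_iff st0.2.1 n ef).mpr ⟨h1, hmem⟩)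
      obtain ⟨ih1, ih2, ih3, ih4, ih5⟩ := ih st0
      refine ⟨?_, ih2, ih3, ih4, ih5⟩
      intro y
      rw [ih1 y]
      constructor
      · rintro (hy | ⟨hy, hyef⟩)
        · exact Or.inl hy
        · exact Or.inr ⟨List.mem_cons_of_mem _ hy, hyef⟩
      · rintro (hy | ⟨hy, hyef⟩)
        · exact Or.inl hy
        · rcases List.mem_cons.mp hy with hyn | hyn
          · subst hyn
            rcases hor with h1 | h1
            · exact absurd h1 hyef
            · exact Or.inl h1
          · exact Or.inr ⟨hyn, hyef⟩

lemma ienLoop_sound (tree : PySem.Dict Int (List Int)) (ef : Int) (T : List Int)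
    (hT : ClosedS (adjT tree) ef T) :
    ∀ (fuel : Nat) (nodes visited : List Int) (count : Int),
      (∀ s ∈ nodes, s ∈ visited) → (∀ x ∈ visited, x ∈ T) →
      ∀ x ∈ (ienLoop tree ef fuel nodes visited count).1, x ∈ T := by
  intro fuel
  induction fuel with
  | zero => intro nodes visited count _ hvT x hx; exact hvT x hx
  | succ fu ih =>
    intro nodes visited count hnv hvT x hx
    match nodes with
    | [] => exact hvT x hx
    | cur :: rest =>
      simp only [ienLoop] at hx
      obtain ⟨f1, f2, _, _, _⟩ := ienFold_spec ef (tree.getD cur []) (rest, (visited, count))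
      dsimp only at f1 f2
      refine ih _ _ _ ?_ ?_ x hx
      · intro s hs
        rcases (f2 s).mp hs with hs1 | hs1
        · exact (f1 s).mpr (Or.inl (hnv s (List.mem_cons_of_mem _ hs1)))
        · exact hs1.1
      · intro z hz
        rcases (f1 z).mp hz with hz1 | ⟨hz1, hz2⟩
        · exact hvT z hz1
        · exact hT cur (hvT cur (hnv cur List.mem_cons_self)) z hz1 hz2

lemma ienLoop_complete (tree : PySem.Dict Int (List Int)) (ef : Int) (T0 : List Int)
    (hT0 : ClosedS (adjT tree) ef T0) (hT0nd : T0.Nodup) :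
    ∀ (fuel : Nat) (nodes visited : List Int) (count : Int),
      (∀ s ∈ nodes, s ∈ visited) → visited.Nodup → (∀ x ∈ visited, x ∈ T0) →
      (∀ x ∈ visited, x ∉ nodes → ∀ y, adjT tree x y → y ≠ ef → y ∈ visited) →
      count = (visited.length : Int) →
      2 * T0.length + nodes.length < fuel + 2 * visited.length →
      (∀ x ∈ visited, x ∈ (ienLoop tree ef fuel nodes visited count).1)
        ∧ ClosedS (adjT tree) ef (ienLoop tree ef fuel nodes visited count).1
        ∧ (ienLoop tree ef fuel nodes visited count).1.Nodup
        ∧ (ienLoop tree ef fuel nodes visited count).2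
            = ((ienLoop tree ef fuel nodes visited count).1.length : Int) := by
  intro fuel
  induction fuel with
  | zero =>
    intro nodes visited count hnv hnd hvT _ _ hfuel
    have : visited.length ≤ T0.length := (List.Nodup.subperm hnd hvT).length_le
    omega
  | succ fu ih =>
    intro nodes visited count hnv hnd hvT hproc hcount hfuel
    match nodes with
    | [] =>
      refine ⟨fun x hx => hx, ?_, hnd, hcount⟩
      intro x hx y hadj hyef
      exact hproc x hx (by simp) y hadj hyef
    | cur :: rest =>
      simp only [ienLoop]
      obtain ⟨f1, f2, f3, f4, f5⟩ := ienFold_spec ef (tree.getD cur []) (rest, (visited, count))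
      dsimp only at f1 f2 f3 f4 f5
      set s := (tree.getD cur []).foldl
        (fun st n =>
          if n != ef && !(PySem.Set.contains st.2.1 n) then
            (n :: st.1, (PySem.Set.add st.2.1 n, st.2.2 + 1))
          else st) (rest, (visited, count)) with hs
      have hvmono : ∀ z ∈ visited, z ∈ s.2.1 := fun z hz => (f1 z).mpr (Or.inl hz)
      have hcurT : cur ∈ T0 := hvT cur (hnv cur List.mem_cons_self)
      have hsvT : ∀ z ∈ s.2.1, z ∈ T0 := by
        intro z hz
        rcases (f1 z).mp hz with hz1 | ⟨hz1, hz2⟩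
        · exact hvT z hz1
        · exact hT0 cur hcurT z hz1 hz2
      have hstack : ∀ z ∈ s.1, z ∈ s.2.1 := by
        intro z hz
        rcases (f2 z).mp hz with hz1 | hz1
        · exact hvmono z (hnv z (List.mem_cons_of_mem _ hz1))
        · exact hz1.1
      have hsnd : s.2.1.Nodup := f3 hnd
      have hproc' : ∀ x ∈ s.2.1, x ∉ s.1 → ∀ y, adjT tree x y → y ≠ ef → y ∈ s.2.1 := by
        intro x hx hxs y hadj hyef
        by_cases hxc : x = cur
        · subst hxc
          exact (f1 y).mpr (Or.inr ⟨hadj, hyef⟩)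
        · have hxv : x ∈ visited := by
            by_contra hxv
            exact hxs ((f2 x).mpr (Or.inr ⟨hx, hxv⟩))
          have hxr : x ∉ rest := fun hr => hxs ((f2 x).mpr (Or.inl hr))
          have := hproc x hxv (by
            intro hmem
            rcases List.mem_cons.mp hmem with h1 | h1
            · exact hxc h1
            · exact hxr h1) y hadj hyef
          exact hvmono y this
      have hvlen : visited.length ≤ s.2.1.length := (List.Nodup.subperm hnd hvmono).length_le
      have hfuel' : 2 * T0.length + s.1.length < fu + 2 * s.2.1.length := by
        simp only [List.length_cons] at hfuel
        omega
      obtain ⟨c1, c2, c3, c4⟩ := ih s.1 s.2.1 s.2.2 hstack hsnd hsvT hproc' (f4 hnd hcount) hfuel'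
      exact ⟨fun x hx => c1 x (hvmono x hx), c2, c3, c4⟩

-- ---- B's saturation loop ----

lemma satStepF_mem (b : Int) (seen : PySem.Set Int) (L' : List (Int × Int)) :
    ∀ (acc : PySem.Set Int) (y : Int),
      y ∈ L'.foldl
        (fun acc p =>
          let acc1 :=
            if PySem.Set.contains seen p.1 && p.2 != b && !(PySem.Set.contains seen p.2) then
              PySem.Set.add acc p.2
            else acc
          if PySem.Set.contains seen p.2 && p.1 != b && !(PySem.Set.contains seen p.1) then
            PySem.Set.add acc1 p.1
          else acc1) acc
      ↔ y ∈ acc ∨ (y ≠ b ∧ y ∉ seen ∧ ∃ q ∈ L', (q.1 ∈ seen ∧ q.2 = y) ∨ (q.2 ∈ seen ∧ q.1 = y)) := by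
  induction L' with
  | nil => intro acc y; simp
  | cons q qs ih =>
    intro acc y
    simp only [List.foldl_cons]
    rw [ih]
    have hstep : ∀ z, (z ∈ (if PySem.Set.contains seen q.2 && q.1 != b && !(PySem.Set.contains seen q.1) then
            PySem.Set.add (if PySem.Set.contains seen q.1 && q.2 != b && !(PySem.Set.contains seen q.2) then
              PySem.Set.add acc q.2 else acc) q.1
          else (if PySem.Set.contains seen q.1 && q.2 != b && !(PySem.Set.contains seen q.2) then
              PySem.Set.add acc q.2 else acc))
        ↔ z ∈ acc ∨ (z ≠ b ∧ z ∉ seen ∧ ((q.1 ∈ seen ∧ q.2 = z) ∨ (q.2 ∈ seen ∧ q.1 = z)))) := by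
      intro z
      by_cases h1 : (PySem.Set.contains seen q.1 && q.2 != b && !(PySem.Set.contains seen q.2)) = true <;>
        by_cases h2 : (PySem.Set.contains seen q.2 && q.1 != b && !(PySem.Set.contains seen q.1)) = true
      · exact absurd ((cond_sat_iff seen q.2 q.1 b).mp h2).1
          ((cond_sat_iff seen q.1 q.2 b).mp h1).2.2
      · obtain ⟨hq1, hq2b, hq2s⟩ := (cond_sat_iff seen q.1 q.2 b).mp h1
        have e2 : (PySem.Set.contains seen q.2 && q.1 != b && !(PySem.Set.contains seen q.1)) = false := by
          simpa using h2
        simp only [if_pos h1, e2, Bool.false_eq_true, if_false, PySem.Set.mem_add]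
        constructor
        · rintro (hz | hz)
          · exact Or.inl hz
          · exact Or.inr ⟨hz ▸ hq2b, hz ▸ hq2s, Or.inl ⟨hq1, hz.symm⟩⟩
        · rintro (hz | ⟨hzb, hzs, hcase⟩)
          · exact Or.inl hz
          · rcases hcase with ⟨_, hz⟩ | ⟨hz1, hz2⟩
            · exact Or.inr hz.symm
            · exact absurd hz1 hq2s
      · obtain ⟨hq2, hq1b, hq1s⟩ := (cond_sat_iff seen q.2 q.1 b).mp h2
        have e1 : (PySem.Set.contains seen q.1 && q.2 != b && !(PySem.Set.contains seen q.2)) = false := by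
          simpa using h1
        simp only [e1, Bool.false_eq_true, if_false, if_pos h2, PySem.Set.mem_add]
        constructor
        · rintro (hz | hz)
          · exact Or.inl hz
          · exact Or.inr ⟨hz ▸ hq1b, hz ▸ hq1s, Or.inr ⟨hq2, hz.symm⟩⟩
        · rintro (hz | ⟨hzb, hzs, hcase⟩)
          · exact Or.inl hz
          · rcases hcase with ⟨hz1, hz2⟩ | ⟨_, hz⟩
            · exact absurd hz1 hq1s
            · exact Or.inr hz.symm
      · have e1 : (PySem.Set.contains seen q.1 && q.2 != b && !(PySem.Set.contains seen q.2)) = false := by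
          simpa using h1
        have e2 : (PySem.Set.contains seen q.2 && q.1 != b && !(PySem.Set.contains seen q.1)) = false := by
          simpa using h2
        simp only [e1, e2, Bool.false_eq_true, if_false]
        constructor
        · intro hz; exact Or.inl hz
        · rintro (hz | ⟨hzb, hzs, hcase⟩)
          · exact hz
          · exfalso
            rcases hcase with ⟨hz1, hz2⟩ | ⟨hz1, hz2⟩
            · exact h1 ((cond_sat_iff seen q.1 q.2 b).mpr ⟨hz1, hz2 ▸ hzb, hz2 ▸ hzs⟩)
            · exact h2 ((cond_sat_iff seen q.2 q.1 b).mpr ⟨hz1, hz2 ▸ hzb, hz2 ▸ hzs⟩)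
    rw [hstep]
    constructor
    · rintro ((hz | ⟨hzb, hzs, hq⟩) | ⟨hzb, hzs, q', hq', hcase⟩)
      · exact Or.inl hz
      · exact Or.inr ⟨hzb, hzs, q, List.mem_cons_self, hq⟩
      · exact Or.inr ⟨hzb, hzs, q', List.mem_cons_of_mem _ hq', hcase⟩
    · rintro (hz | ⟨hzb, hzs, q', hq', hcase⟩)
      · exact Or.inl (Or.inl hz)
      · rcases List.mem_cons.mp hq' with h | h
        · exact Or.inl (Or.inr ⟨hzb, hzs, h ▸ hcase⟩)
        · exact Or.inr ⟨hzb, hzs, q', h, hcase⟩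

lemma satStep_mem (L : List (Int × Int)) (b : Int) (seen : PySem.Set Int) (y : Int) :
    y ∈ satStep L b seen ↔ (∃ p ∈ seen, adjL L p y) ∧ y ≠ b ∧ y ∉ seen := by
  unfold satStep
  rw [satStepF_mem b seen L PySem.Set.empty y]
  constructor
  · rintro (hy | ⟨hyb, hys, q, hq, ⟨h1, h2⟩ | ⟨h1, h2⟩⟩)
    · exact absurd hy (List.not_mem_nil)
    · refine ⟨⟨q.1, h1, Or.inl ?_⟩, hyb, hys⟩
      rw [← h2]
      simpa using hq
    · refine ⟨⟨q.2, h1, Or.inr ?_⟩, hyb, hys⟩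
      rw [← h2]
      simpa using hq
  · rintro ⟨⟨p, hp, hadj⟩, hyb, hys⟩
    refine Or.inr ⟨hyb, hys, ?_⟩
    rcases hadj with hm | hm
    · exact ⟨(p, y), hm, Or.inl ⟨hp, rfl⟩⟩
    · exact ⟨(y, p), hm, Or.inr ⟨hp, rfl⟩⟩

lemma satStepF_nodup (b : Int) (seen : PySem.Set Int) (L' : List (Int × Int)) :
    ∀ (acc : PySem.Set Int), acc.Nodup →
      (L'.foldl
        (fun acc p =>
          let acc1 :=
            if PySem.Set.contains seen p.1 && p.2 != b && !(PySem.Set.contains seen p.2) then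
              PySem.Set.add acc p.2
            else acc
          if PySem.Set.contains seen p.2 && p.1 != b && !(PySem.Set.contains seen p.1) then
            PySem.Set.add acc1 p.1
          else acc1) acc).Nodup := by
  induction L' with
  | nil => intro acc h; exact h
  | cons q qs ih =>
    intro acc hacc
    simp only [List.foldl_cons]
    apply ih
    show (if PySem.Set.contains seen q.2 && q.1 != b && !(PySem.Set.contains seen q.1) then
        PySem.Set.add (if PySem.Set.contains seen q.1 && q.2 != b && !(PySem.Set.contains seen q.2) then
          PySem.Set.add acc q.2 else acc) q.1
      else (if PySem.Set.contains seen q.1 && q.2 != b && !(PySem.Set.contains seen q.2) then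
          PySem.Set.add acc q.2 else acc)).Nodup
    split <;> split <;>
      first
        | exact PySem.Set.nodup_add _ _ (PySem.Set.nodup_add _ _ hacc)
        | exact PySem.Set.nodup_add _ _ hacc
        | exact hacc

lemma satStep_nodup (L : List (Int × Int)) (b : Int) (seen : PySem.Set Int) :
    (satStep L b seen).Nodup := by
  unfold satStep
  exact satStepF_nodup b seen L PySem.Set.empty (by simp [PySem.Set.empty])

lemma satLoop_sound (L : List (Int × Int)) (b : Int) (T : List Int)
    (hT : ClosedS (adjL L) b T) :
    ∀ (fuel : Nat) (seen : PySem.Set Int), (∀ x ∈ seen, x ∈ T) →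
      ∀ x ∈ satLoop L b fuel seen, x ∈ T := by
  intro fuel
  induction fuel with
  | zero => intro seen hsT x hx; exact hsT x hx
  | succ fu ih =>
    intro seen hsT x hx
    simp only [satLoop] at hx
    by_cases he : (satStep L b seen).isEmpty
    · rw [if_pos he] at hx; exact hsT x hx
    · rw [if_neg he] at hx
      refine ih _ ?_ x hx
      intro z hz
      rcases (PySem.Set.mem_union _ _ z).mp hz with hz1 | hz1
      · exact hsT z hz1
      · obtain ⟨⟨p, hp, hadj⟩, hzb, _⟩ := (satStep_mem L b seen z).mp hz1
        exact hT p (hsT p hp) z hadj hzb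

lemma satLoop_complete (L : List (Int × Int)) (b : Int) (T0 : List Int)
    (hT0 : ClosedS (adjL L) b T0) (hT0nd : T0.Nodup) :
    ∀ (fuel : Nat) (seen : PySem.Set Int),
      seen.Nodup → (∀ x ∈ seen, x ∈ T0) →
      T0.length < fuel + seen.length →
      (∀ x ∈ seen, x ∈ satLoop L b fuel seen)
        ∧ ClosedS (adjL L) b (satLoop L b fuel seen)
        ∧ (satLoop L b fuel seen).Nodup := by
  intro fuel
  induction fuel with
  | zero =>
    intro seen hnd hsT hfuel
    have : seen.length ≤ T0.length := (List.Nodup.subperm hnd hsT).length_le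
    omega
  | succ fu ih =>
    intro seen hnd hsT hfuel
    simp only [satLoop]
    by_cases he : (satStep L b seen).isEmpty
    · rw [if_pos he]
      refine ⟨fun x hx => hx, ?_, hnd⟩
      intro x hx y hadj hyb
      by_contra hys
      have : y ∈ satStep L b seen := (satStep_mem L b seen y).mpr ⟨⟨x, hx, hadj⟩, hyb, hys⟩
      rw [List.isEmpty_iff.mp he] at this
      simp at this
    · rw [if_neg he]
      have hdisj : ∀ x ∈ satStep L b seen, x ∉ seen := by
        intro x hx
        exact ((satStep_mem L b seen x).mp hx).2.2
      have hunion : PySem.Set.union seen (satStep L b seen) = seen ++ satStep L b seen :=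
        PySem.Set.update_eq_append_of_disjoint seen _ (satStep_nodup L b seen) hdisj
      have hnd' : (PySem.Set.union seen (satStep L b seen)).Nodup := by
        rw [hunion]
        exact List.Nodup.append hnd (satStep_nodup L b seen)
          (fun x hx1 hx2 => (hdisj x hx2) hx1)
      have hsT' : ∀ x ∈ PySem.Set.union seen (satStep L b seen), x ∈ T0 := by
        intro x hx
        rcases (PySem.Set.mem_union _ _ x).mp hx with hx1 | hx1
        · exact hsT x hx1
        · obtain ⟨⟨p, hp, hadj⟩, hxb, _⟩ := (satStep_mem L b seen x).mp hx1
          exact hT0 p (hsT p hp) x hadj hxb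
      have hlen : (PySem.Set.union seen (satStep L b seen)).length
          = seen.length + (satStep L b seen).length := by
        rw [hunion, List.length_append]
      have hpos : 0 < (satStep L b seen).length := by
        cases hst : satStep L b seen with
        | nil => rw [hst] at he; simp at he
        | cons a t => simp
      have hfuel' : T0.length < fu + (PySem.Set.union seen (satStep L b seen)).length := by
        omega
      obtain ⟨c1, c2, c3⟩ := ih _ hnd' hsT' hfuel'
      refine ⟨?_, c2, c3⟩
      intro x hx
      exact c1 x ((PySem.Set.mem_union _ _ x).mpr (Or.inl hx))

-- ---- the two reachability parities agree ----

lemma isEvenNodes_eq_reachEven (tree : PySem.Dict Int (List Int)) (L : List (Int × Int))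
    (hcnt : Hcnt tree L) (N : Nat) (hN : 4 * L.length + 4 ≤ N) (u b : Int) :
    isEvenNodes tree N u b = reachEven L u b := by
  have hT0c : ClosedS (adjT tree) b (nodesOf u L) :=
    (closed_transfer hcnt b _).mpr (nodesOf_closed u b L)
  have hT0nd := nodesOf_nodup u L
  have hT0len := nodesOf_len u L
  have hstart := nodesOf_start u L
  obtain ⟨a1, a2, a3, a4⟩ := ienLoop_complete tree b (nodesOf u L) hT0c hT0nd N [u] [u] 1
    (fun s hs => hs) (by simp) (fun x hx => by rwa [List.mem_singleton.mp hx])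
    (fun x hx hnx => absurd hx hnx) (by simp)
    (by simp only [List.length_singleton]; omega)
  obtain ⟨b1, b2, b3⟩ := satLoop_complete L b (nodesOf u L) (nodesOf_closed u b L) hT0nd
    (2 * L.length + 2) [u] (by simp) (fun x hx => by rwa [List.mem_singleton.mp hx])
    (by simp only [List.length_singleton]; omega)
  have hAB : ∀ x ∈ (ienLoop tree b N [u] [u] 1).1, x ∈ satLoop L b (2 * L.length + 2) [u] := by
    apply ienLoop_sound tree b _ ((closed_transfer hcnt b _).mpr b2) N [u] [u] 1
      (fun s hs => hs)
    intro x hx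
    rw [List.mem_singleton.mp hx]
    exact b1 u (List.mem_singleton_self u)
  have hBA : ∀ x ∈ satLoop L b (2 * L.length + 2) [u], x ∈ (ienLoop tree b N [u] [u] 1).1 := by
    apply satLoop_sound L b _ ((closed_transfer hcnt b _).mp a2) (2 * L.length + 2) [u]
    intro x hx
    rw [List.mem_singleton.mp hx]
    exact a1 u (List.mem_singleton_self u)
  have hperm : (ienLoop tree b N [u] [u] 1).1.Perm (satLoop L b (2 * L.length + 2) [u]) :=
    (List.perm_ext_iff_of_nodup a3 b3).mpr (fun a => ⟨hAB a, hBA a⟩)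
  have hlen : (ienLoop tree b N [u] [u] 1).1.length
      = (satLoop L b (2 * L.length + 2) [u]).length := hperm.length_eq
  show (PySem.Int.mod (ienLoop tree b N [u] (PySem.Set.ofList [u]) 1).2 2 == 0)
      = (PySem.Int.mod (PySem.Set.len (satLoop L b (2 * L.length + 2) (PySem.Set.ofList [u]))) 2 == 0)
  have hofl : PySem.Set.ofList [u] = [u] := rfl
  rw [hofl, a4, hlen]
  rfl

-- ---- the edge-multiset invariant ----

lemma ite_pair_split (p : Int × Int) (x y : Int) :
    (if p = (x, y) then (1 : Nat) else 0)
      = (if p.1 = x then (if p.2 = y then 1 else 0) else 0) := by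
  by_cases e1 : p.1 = x <;> by_cases e2 : p.2 = y <;> simp [Prod.ext_iff, e1, e2]

lemma makeTree_step_count (d : PySem.Dict Int (List Int)) (a b2 x y : Int) :
    (((d.modify a [] (fun l => l ++ [b2])).modify b2 [] (fun l => l ++ [a])).getD x []).count y
      = ((d.getD x []).count y + (if a = x then (if b2 = y then 1 else 0) else 0))
        + (if a = y then (if b2 = x then 1 else 0) else 0) := by
  by_cases hxb : x = b2
  · subst hxb
    rw [PySem.Dict.getD_modify_self]
    by_cases hba : x = a
    · subst hba
      rw [PySem.Dict.getD_modify_self]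
      simp only [List.count_append, List.count_cons, List.count_nil, beq_iff_eq]
      split_ifs <;> omega
    · rw [PySem.Dict.getD_modify_of_ne _ _ _ (fun h => hba h)]
      simp only [List.count_append, List.count_cons, List.count_nil, beq_iff_eq]
      split_ifs <;> omega
  · rw [PySem.Dict.getD_modify_of_ne _ _ _ hxb]
    by_cases hxa : x = a
    · subst hxa
      rw [PySem.Dict.getD_modify_self]
      simp only [List.count_append, List.count_cons, List.count_nil, beq_iff_eq]
      split_ifs <;> omega
    · rw [PySem.Dict.getD_modify_of_ne _ _ _ hxa]
      split_ifs <;> omega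

lemma makeTree_fold_count :
    ∀ (L : List (Int × Int)) (d : PySem.Dict Int (List Int)) (x y : Int),
      ((L.foldl
        (fun d p =>
          (d.modify p.1 [] (fun l => l ++ [p.2])).modify p.2 [] (fun l => l ++ [p.1])) d).getD x []).count y
      = ((d.getD x []).count y + L.count (x, y)) + L.count (y, x) := by
  intro L
  induction L with
  | nil => intro d x y; simp
  | cons p ps ih =>
    intro d x y
    simp only [List.foldl_cons]
    rw [ih, makeTree_step_count]
    simp only [List.count_cons, beq_iff_eq]
    rw [ite_pair_split p x y, ite_pair_split p y x]
    split_ifs <;> omega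

lemma hcnt_makeTree (f t : List Int) : Hcnt (makeTree f t) (f.zip t) := by
  intro x y
  unfold makeTree
  rw [makeTree_fold_count]
  simp

lemma hcnt_removeEdge {tree : PySem.Dict Int (List Int)} {L : List (Int × Int)}
    (hcnt : Hcnt tree L) {i : Nat} (hi : i < L.length) {u v : Int} (huv : L[i] = (u, v)) :
    Hcnt (removeEdge tree u v) (L.eraseIdx i) := by
  have hmemL : (u, v) ∈ L := huv ▸ L.getElem_mem hi
  have hcuv : 0 < L.count (u, v) := List.count_pos_iff.mpr hmemL
  have hvmem : v ∈ tree.getD u [] := by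
    apply List.count_pos_iff.mp
    rw [hcnt u v]
    omega
  intro x y
  unfold removeEdge
  rw [pv_count_eraseIdx L i hi (x, y), pv_count_eraseIdx L i hi (y, x), huv]
  rw [ite_pair_split (u, v) x y, ite_pair_split (u, v) y x]
  dsimp only
  by_cases hxv : x = v
  · subst hxv
    rw [PySem.Dict.getD_modify_self]
    by_cases hvu : x = u
    · subst hvu
      -- self loop: u = v = x
      rw [PySem.Dict.getD_modify_self]
      rw [pv_remove_getD hvmem]
      have hxmem2 : x ∈ (tree.getD x []).erase x := by
        apply List.count_pos_iff.mp
        rw [List.count_erase]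
        have := hcnt x x
        simp only [beq_self_eq_true, if_true]
        omega
      rw [pv_remove_getD hxmem2]
      rw [List.count_erase, List.count_erase]
      have hb := hcnt x y
      have hbx := hcnt x x
      by_cases hxy : x = y
      · subst hxy
        simp only [beq_self_eq_true, if_true]
        (try split_ifs) <;> omega
      · have hbeq : ((x == y) : Bool) = false := by simpa using hxy
        rw [hbeq]
        simp only [Bool.false_eq_true, if_false]
        (try split_ifs) <;> omega
    · -- x = v, x ≠ u
      rw [PySem.Dict.getD_modify_of_ne _ _ _ hvu]
      have humem : u ∈ tree.getD x [] := by
        apply List.count_pos_iff.mp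
        rw [hcnt x u]
        omega
      rw [pv_remove_getD humem, List.count_erase]
      have hb := hcnt x y
      by_cases huy : u = y
      · subst huy
        have hbu := hcnt x u
        simp only [beq_self_eq_true, if_true]
        (try split_ifs) <;> omega
      · have hbeq : ((u == y) : Bool) = false := by simpa using huy
        rw [hbeq]
        simp only [Bool.false_eq_true, if_false]
        (try split_ifs) <;> omega
  · rw [PySem.Dict.getD_modify_of_ne _ _ _ hxv]
    by_cases hxu : x = u
    · subst hxu
      -- x = u, x ≠ v
      rw [PySem.Dict.getD_modify_self]
      rw [pv_remove_getD hvmem, List.count_erase]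
      have hb := hcnt x y
      by_cases hvy : v = y
      · subst hvy
        have hbv := hcnt x v
        simp only [beq_self_eq_true, if_true]
        (try split_ifs) <;> omega
      · have hbeq : ((v == y) : Bool) = false := by simpa using hvy
        rw [hbeq]
        simp only [Bool.false_eq_true, if_false]
        (try split_ifs) <;> omega
    · rw [PySem.Dict.getD_modify_of_ne _ _ _ hxu]
      have hb := hcnt x y
      (try split_ifs) <;> omega

lemma zip_eraseIdx :
    ∀ (i : Nat) (f t : List Int), i < f.length → f.length ≤ t.length →
      (f.eraseIdx i).zip (t.eraseIdx i) = (f.zip t).eraseIdx i := by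
  intro i
  induction i with
  | zero =>
    intro f t h1 h2
    match f, t with
    | a :: f', b :: t' => simp
  | succ j ih =>
    intro f t h1 h2
    match f, t with
    | a :: f', b :: t' =>
      simp only [List.eraseIdx_cons_succ, List.zip_cons_cons]
      rw [ih f' t' (by simpa using h1) (by simpa using h2)]

-- ---- removeFirst: first removable index ----

lemma removeFirst_none (L : List (Int × Int)) :
    ∀ (m k : Nat), L.length ≤ k + m →
      (∀ (j : Nat) (hj : j < L.length), k ≤ j → rmB L (L[j]) = false) →
      removeFirst L (L.drop k) = none := by
  intro m
  induction m with
  | zero =>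
    intro k hk _
    rw [List.drop_eq_nil_of_le (by omega)]
    rfl
  | succ m ih =>
    intro k hk hall
    by_cases hkL : L.length ≤ k
    · rw [List.drop_eq_nil_of_le hkL]; rfl
    · have hklt : k < L.length := by omega
      rw [List.drop_eq_getElem_cons hklt]
      simp only [removeFirst]
      have hrk := hall k hklt (le_refl k)
      unfold rmB at hrk
      rw [if_neg (by simp [hrk])]
      rw [ih (k + 1) (by omega) (fun j hj hkj => hall j hj (by omega))]
      rfl

lemma removeFirst_some (L : List (Int × Int)) (i : Nat) (hi : i < L.length)
    (hrm : rmB L (L[i]) = true) :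
    ∀ (d k : Nat), i = k + d →
      (∀ (j : Nat) (hj : j < L.length), k ≤ j → j < i → rmB L (L[j]) = false) →
      removeFirst L (L.drop k) = some ((L.eraseIdx i).drop k) := by
  intro d
  induction d with
  | zero =>
    intro k hk _
    have hik : k = i := by omega
    subst hik
    rw [List.drop_eq_getElem_cons hi]
    simp only [removeFirst]
    unfold rmB at hrm
    rw [if_pos hrm]
    congr 1
    rw [List.eraseIdx_eq_take_drop_succ]
    have hlt : (L.take k).length = k := by rw [List.length_take]; omega
    have hdl := List.drop_left (l₁ := L.take k) (l₂ := L.drop (k + 1))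
    rw [hlt] at hdl
    exact hdl.symm
  | succ d ihd =>
    intro k hk hall
    have hklt : k < L.length := by omega
    rw [List.drop_eq_getElem_cons hklt]
    simp only [removeFirst]
    have hrk := hall k hklt (le_refl k) (by omega)
    unfold rmB at hrk
    rw [if_neg (by simp [hrk])]
    rw [ihd (k + 1) (by omega) (fun j hj h1 h2 => hall j hj (by omega) h2)]
    have hkel : k < (L.eraseIdx i).length := by
      rw [List.length_eraseIdx, if_pos hi]
      omega
    rw [List.drop_eq_getElem_cons hkel]
    simp only [Option.map_some]
    congr 2
    rw [List.getElem_eraseIdx]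
    rw [dif_pos (by omega)]

-- ---- the main bisimulation ----

lemma bisim (N : Nat) :
    ∀ (fuel : Nat) (tree : PySem.Dict Int (List Int)) (f t : List Int) (i : Nat) (cnt : Int)
      (gfuel : Nat),
      Hcnt tree (f.zip t) → f.length ≤ t.length → i ≤ f.length →
      (∀ (j : Nat) (hj : j < (f.zip t).length), j < i → rmB (f.zip t) ((f.zip t)[j]) = false) →
      4 * (f.zip t).length + 4 ≤ N →
      (f.zip t).length < gfuel →
      (f.length + 1) * (f.length + 1) + 1 ≤ fuel + i →
      loopA N fuel tree f t i cnt = greedyB gfuel (f.zip t) cnt := by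
  intro fuel
  induction fuel with
  | zero =>
    intro tree f t i cnt gfuel _ _ hi _ _ _ hfuel
    exfalso
    have hsq : (f.length + 1) * (f.length + 1) = f.length * f.length + 2 * f.length + 1 := by
      ring
    omega
  | succ fu ih =>
    intro tree f t i cnt gfuel hcnt hlen hi hprev hN hg hfuel
    have hzlen : (f.zip t).length = f.length := by
      rw [List.length_zip]; omega
    obtain ⟨g, rfl⟩ : ∃ g, gfuel = g + 1 := ⟨gfuel - 1, by omega⟩
    simp only [loopA]
    by_cases hieq : i = f.length
    · rw [if_pos hieq]
      have hnone : removeFirst (f.zip t) ((f.zip t).drop 0) = none := by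
        apply removeFirst_none (f.zip t) (f.zip t).length 0 (by omega)
        intro j hj _
        exact hprev j hj (by omega)
      rw [List.drop_zero] at hnone
      simp only [greedyB, hnone]
    · rw [if_neg hieq]
      have hilt : i < f.length := by omega
      have hit : i < t.length := by omega
      have hu : PySem.List.pyGetD f (i : Int) 0 = f[i] := by
        rw [PySem.List.pyGetD_natCast, List.getD_eq_getElem f 0 hilt]
      have hv : PySem.List.pyGetD t (i : Int) 0 = t[i] := by
        rw [PySem.List.pyGetD_natCast, List.getD_eq_getElem t 0 hit]
      have hizlt : i < (f.zip t).length := by omega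
      have hLi : (f.zip t)[i] = (f[i], t[i]) := List.getElem_zip
      have he1 : isEvenNodes tree N (PySem.List.pyGetD f (i : Int) 0) (PySem.List.pyGetD t (i : Int) 0)
          = reachEven (f.zip t) f[i] t[i] := by
        rw [hu, hv]
        exact isEvenNodes_eq_reachEven tree (f.zip t) hcnt N hN f[i] t[i]
      have he2 : isEvenNodes tree N (PySem.List.pyGetD t (i : Int) 0) (PySem.List.pyGetD f (i : Int) 0)
          = reachEven (f.zip t) t[i] f[i] := by
        rw [hu, hv]
        exact isEvenNodes_eq_reachEven tree (f.zip t) hcnt N hN t[i] f[i]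
      rw [he1, he2]
      have hrmB : (reachEven (f.zip t) f[i] t[i] && reachEven (f.zip t) t[i] f[i])
          = rmB (f.zip t) ((f.zip t)[i]) := by
        rw [hLi]; rfl
      rw [hrmB]
      by_cases hr : rmB (f.zip t) ((f.zip t)[i]) = true
      · rw [if_pos hr]
        have hsome : removeFirst (f.zip t) ((f.zip t).drop 0)
            = some (((f.zip t).eraseIdx i).drop 0) := by
          apply removeFirst_some (f.zip t) i hizlt hr i 0 (by omega)
          intro j hj _ hji
          exact hprev j hj hji
        rw [List.drop_zero, List.drop_zero] at hsome
        simp only [greedyB, hsome]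
        have hzip' : ((f.eraseIdx i).zip (t.eraseIdx i)) = (f.zip t).eraseIdx i :=
          zip_eraseIdx i f t hilt hlen
        have hflen : (f.eraseIdx i).length = f.length - 1 := by
          rw [List.length_eraseIdx, if_pos hilt]
        have htlen : (t.eraseIdx i).length = t.length - 1 := by
          rw [List.length_eraseIdx, if_pos hit]
        have hezlen : ((f.zip t).eraseIdx i).length = (f.zip t).length - 1 := by
          rw [List.length_eraseIdx, if_pos hizlt]
        rw [hu, hv]
        rw [ih (removeEdge tree f[i] t[i]) (f.eraseIdx i) (t.eraseIdx i) 0 (cnt + 1) g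
          (by rw [hzip']; exact hcnt_removeEdge hcnt hizlt hLi)
          (by omega)
          (by omega)
          (by intro j hj hj0; omega)
          (by rw [hzip']; omega)
          (by rw [hzip']; omega)
          (by
            rw [hflen, Nat.sub_add_cancel (by omega)]
            have hsq : (f.length + 1) * (f.length + 1) = f.length * f.length + 2 * f.length + 1 := by
              ring
            omega)]
        rw [hzip']
      · rw [if_neg hr]
        apply ih tree f t (i + 1) cnt (g + 1) hcnt hlen (by omega) ?_ hN hg (by omega)
        intro j hj hji
        by_cases hjie : j = i
        · subst hjie
          simpa using hr
        · exact hprev j hj (by omega)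

-- ===== VERDICT (by name: the statement is the Claim_ definition above) =====
theorem evenForest_spec : Claim_equal_evenForest := by
  intro t_nodes t_edges t_from t_to _ hpre
  have hpre' : t_from.length ≤ t_to.length := hpre
  unfold Spec_evenForest evenForest evenForest_alt
  have hz : (t_from.zip t_to).length = t_from.length := by
    rw [List.length_zip]; omega
  have hb := bisim (4 * t_from.length + 4)
    ((t_from.length + 1) * (t_from.length + 1) + 1) (makeTree t_from t_to)
    t_from t_to 0 0 (t_from.length + 1)
    (hcnt_makeTree t_from t_to) hpre' (Nat.zero_le _)
    (by intro j hj hj0; omega) (by omega) (by omega) (by omega)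
  exact hb
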